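-- pv_equiv track=rewrite | github.com/Hansimov/bili-search | elastics/highlighter.py | calc_pinyin_offsets
-- ===== SOURCE A (Python) =====
-- def calc_pinyin_offsets(pinyins: list[str]):
--     # Example:
--     #   pinyins = ["zai", "a", "li", "ba", "ba"]
--     # then pinyin_offsets are:
--     #   [(0,3), (3,4), (4,6), (6,8), (8,10)]
--     pinyin_offsets = []
--     start_offset = 0
--     end_offset = 0
--     for pinyin in pinyins:
--         end_offset = start_offset + len(pinyin)
--         pinyin_offsets.append((start_offset, end_offset))
--         start_offset = end_offset
--     return pinyin_offsets
-- ===== SOURCE B (Python) =====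
-- def calc_pinyin_offsets(pinyins: list[str]):
--     # Divide and conquer: compute offsets of each half independently,
--     # then shift the right half by the total length of the left half.
--     if not pinyins:
--         return []
--     if len(pinyins) == 1:
--         return [(0, len(pinyins[0]))]
--     mid = len(pinyins) // 2
--     shift = sum(len(p) for p in pinyins[:mid])
--     left = calc_pinyin_offsets(pinyins[:mid])
--     right = calc_pinyin_offsets(pinyins[mid:])
--     return left + [(s + shift, e + shift) for (s, e) in right]
-- ===== Notes on version B (the rewrite author's own statement) =====
-- stated objective: alternative
-- what changed: B replaces A's single left-to-right pass with a threaded start/end accumulator by a divide-and-conquer recursion: offsets of each half are computed independently and the right half's offsets are shifted by the total length of the left half.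
import Mathlib
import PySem

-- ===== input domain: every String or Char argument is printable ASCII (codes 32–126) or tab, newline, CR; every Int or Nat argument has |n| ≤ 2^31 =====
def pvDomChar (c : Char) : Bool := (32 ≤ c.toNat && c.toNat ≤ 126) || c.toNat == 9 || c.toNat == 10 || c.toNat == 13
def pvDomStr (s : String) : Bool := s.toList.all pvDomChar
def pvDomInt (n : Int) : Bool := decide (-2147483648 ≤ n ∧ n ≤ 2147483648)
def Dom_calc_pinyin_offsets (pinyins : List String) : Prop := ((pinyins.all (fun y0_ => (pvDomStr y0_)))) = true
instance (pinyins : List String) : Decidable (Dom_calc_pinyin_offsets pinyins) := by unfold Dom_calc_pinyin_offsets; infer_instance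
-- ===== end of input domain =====

-- B computes the offsets by divide and conquer (solve each half, shift the right half)
-- instead of A's single accumulator pass; alternative algorithm, same results.


-- ===== PORT A =====
-- state: (pinyin_offsets, start_offset, end_offset)
def calc_pinyin_offsets (pinyins : List String) : List (Int × Int) :=
  (pinyins.foldl
    (fun (st : List (Int × Int) × Int × Int) pinyin =>
      let end_offset := st.2.1 + PySem.Str.len pinyin
      (st.1 ++ [(st.2.1, end_offset)], end_offset, end_offset))
    ([], 0, 0)).1

-- ===== PORT B =====
-- pinyins[:mid] / pinyins[mid:] with 0 ≤ mid ≤ len are exactly List.take / List.drop.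
def calc_pinyin_offsets_alt (pinyins : List String) : List (Int × Int) :=
  match pinyins with
  | [] => []
  | [p] => [((0 : Int), PySem.Str.len p)]
  | p :: q :: rest =>
    let mid := (p :: q :: rest).length / 2
    let shift := ((p :: q :: rest).take mid).foldl (fun a pin => a + PySem.Str.len pin) (0 : Int)
    let left := calc_pinyin_offsets_alt ((p :: q :: rest).take mid)
    let right := calc_pinyin_offsets_alt ((p :: q :: rest).drop mid)
    left ++ right.map (fun pr => (pr.1 + shift, pr.2 + shift))
termination_by pinyins.length
decreasing_by
  · simp; omega
  · simp; omega

-- ===== PRECONDITION & SPEC =====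
def Spec_calc_pinyin_offsets (pinyins : List String) (out : List (Int × Int)) : Prop := out = calc_pinyin_offsets_alt pinyins
instance (pinyins : List String) (out : List (Int × Int)) : Decidable (Spec_calc_pinyin_offsets pinyins out) := by unfold Spec_calc_pinyin_offsets; infer_instance

-- ===== CLAIM (what is proved, stated in full; the proofs are below) =====
def Claim_equal_calc_pinyin_offsets : Prop := ∀ (pinyins : List String), Dom_calc_pinyin_offsets pinyins → Spec_calc_pinyin_offsets pinyins (calc_pinyin_offsets pinyins)

-- ===== LEMMAS AND PROOFS =====

-- reference: the offset pairs starting at offset s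
def pvGo (s : Int) : List String → List (Int × Int)
  | [] => []
  | p :: ps => (s, s + PySem.Str.len p) :: pvGo (s + PySem.Str.len p) ps

-- reference: total length
def pvTotal : List String → Int
  | [] => 0
  | p :: ps => PySem.Str.len p + pvTotal ps

theorem pvA_eq (ps : List String) : ∀ (acc : List (Int × Int)) (s e : Int),
    (ps.foldl
      (fun (st : List (Int × Int) × Int × Int) pinyin =>
        let end_offset := st.2.1 + PySem.Str.len pinyin
        (st.1 ++ [(st.2.1, end_offset)], end_offset, end_offset))
      (acc, s, e)).1 = acc ++ pvGo s ps := by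
  induction ps with
  | nil => intro acc s e; simp [pvGo]
  | cons p ps ih =>
      intro acc s e
      simp only [List.foldl, pvGo]
      rw [ih]
      simp

theorem pvSum_eq (ps : List String) : ∀ (a : Int),
    ps.foldl (fun a pin => a + PySem.Str.len pin) a = a + pvTotal ps := by
  induction ps with
  | nil => intro a; simp [pvTotal]
  | cons p ps ih =>
      intro a
      simp only [List.foldl, pvTotal]
      rw [ih]
      ring

theorem pvGo_append (xs ys : List String) : ∀ (s : Int),
    pvGo s (xs ++ ys) = pvGo s xs ++ pvGo (s + pvTotal xs) ys := by
  induction xs with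
  | nil => intro s; simp [pvGo, pvTotal]
  | cons p xs ih =>
      intro s
      simp only [List.cons_append, pvGo, pvTotal]
      rw [ih]
      ring_nf

theorem pvGo_shift (xs : List String) : ∀ (t : Int),
    pvGo t xs = (pvGo 0 xs).map (fun pr => (pr.1 + t, pr.2 + t)) := by
  induction xs with
  | nil => intro t; simp [pvGo]
  | cons p xs ih =>
      intro t
      simp only [pvGo, List.map_cons, zero_add]
      rw [ih (t + PySem.Str.len p), ih (PySem.Str.len p), List.map_map]
      refine congrArg₂ List.cons ?_ ?_
      · rw [Prod.mk.injEq]; constructor <;> ring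
      · congr 1
        funext pr
        rw [Function.comp_apply, Prod.mk.injEq]
        constructor <;> ring

theorem pvAlt_eq : ∀ (n : Nat) (ps : List String), ps.length ≤ n →
    calc_pinyin_offsets_alt ps = pvGo 0 ps := by
  intro n
  induction n with
  | zero =>
      intro ps h
      have : ps = [] := List.length_eq_zero_iff.mp (Nat.le_zero.mp h)
      subst this
      simp [calc_pinyin_offsets_alt, pvGo]
  | succ n ih =>
      intro ps h
      match ps with
      | [] => simp [calc_pinyin_offsets_alt, pvGo]
      | [p] => simp [calc_pinyin_offsets_alt, pvGo]
      | p :: q :: rest =>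
        rw [calc_pinyin_offsets_alt]
        have hlen : (p :: q :: rest).length = rest.length + 2 := by simp
        have hmid : (p :: q :: rest).length / 2 ≥ 1 := by rw [hlen]; omega
        have hmid2 : (p :: q :: rest).length / 2 < (p :: q :: rest).length := by
          rw [hlen]; omega
        have h1 : ((p :: q :: rest).take ((p :: q :: rest).length / 2)).length ≤ n := by
          rw [List.length_take]; omega
        have h2 : ((p :: q :: rest).drop ((p :: q :: rest).length / 2)).length ≤ n := by
          rw [List.length_drop]; omega
        rw [ih _ h1, ih _ h2, pvSum_eq]
        have := pvGo_append ((p :: q :: rest).take ((p :: q :: rest).length / 2))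
            ((p :: q :: rest).drop ((p :: q :: rest).length / 2)) 0
        rw [List.take_append_drop] at this
        rw [this, pvGo_shift _ (0 + pvTotal ((p :: q :: rest).take ((p :: q :: rest).length / 2)))]

-- ===== VERDICT (by name: the statement is the Claim_ definition above) =====
theorem calc_pinyin_offsets_spec : Claim_equal_calc_pinyin_offsets := by
  intro pinyins _
  unfold Spec_calc_pinyin_offsets calc_pinyin_offsets
  rw [pvA_eq, pvAlt_eq pinyins.length pinyins (le_refl _)]
  simp
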